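-- pv_equiv track=rewrite | github.com/Jan21/transformer-search | data_generation/generate_chains.py | filter_unique_paths
-- ===== SOURCE A (Python) =====
-- def filter_unique_paths(paths_lst):
--     if not paths_lst:
--         return []
--
--     # Keep track of which paths should be excluded
--     paths_to_exclude = set()
--
--     # For each path, check if it contains any shorter path as a subsequence
--     for path in paths_lst:
--         for other_path in paths_lst:
--             # Skip if same path or if other_path is not shorter
--             if path == other_path or len(other_path) >= len(path):
--                 continue
--
--             # Check if other_path is a subsequence of path
--             j, k = 0, 0  # j for other_path, k for path
--             while j < len(other_path) and k < len(path):
--                 if other_path[j] == path[k]: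
--                     j += 1
--                 k += 1
--
--             # If other_path is a subsequence of path, exclude path
--             if j == len(other_path):
--                 paths_to_exclude.add(tuple(path))
--                 break
--
--     # Return all paths except those that contain shorter paths as subsequences
--     return [path for path in paths_lst if tuple(path) not in paths_to_exclude]
-- ===== SOURCE B (Python) =====
-- def filter_unique_paths(paths_lst):
--     def is_subseq(short, long):
--         it = iter(long)
--         return all(c in it for c in short)
--
--     excluded = set()
--     shorter, same, cur_len = [], [], -1
--     for p in sorted(paths_lst, key=len):
--         if len(p) != cur_len:
--             shorter += same
--             same, cur_len = [], len(p)
--         if any(is_subseq(q, p) for q in shorter):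
--             excluded.add(tuple(p))
--         same.append(p)
--     return [p for p in paths_lst if tuple(p) not in excluded]
-- ===== Notes on version B (the rewrite author's own statement) =====
-- stated objective: alternative
-- what changed: Replaces A's all-pairs double loop (each path scanned against every other path) by a stable length-sort and a single sweep that accumulates the strictly-shorter paths processed so far and tests each path only against that accumulated set, with an iterator-consuming subsequence test instead of A's two-index while loop.
import Mathlib
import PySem

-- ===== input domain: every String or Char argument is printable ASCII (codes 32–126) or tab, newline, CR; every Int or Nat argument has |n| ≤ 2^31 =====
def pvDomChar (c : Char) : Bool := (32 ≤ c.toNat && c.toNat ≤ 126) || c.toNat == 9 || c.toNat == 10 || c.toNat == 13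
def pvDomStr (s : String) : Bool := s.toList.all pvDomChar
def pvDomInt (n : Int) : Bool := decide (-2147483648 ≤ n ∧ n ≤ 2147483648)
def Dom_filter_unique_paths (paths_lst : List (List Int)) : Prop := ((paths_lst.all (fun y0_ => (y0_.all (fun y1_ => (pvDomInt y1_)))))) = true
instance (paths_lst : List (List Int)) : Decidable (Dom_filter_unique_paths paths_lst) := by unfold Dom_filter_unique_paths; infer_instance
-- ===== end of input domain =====

-- B replaces A's all-pairs double loop by a stable length-sort plus a single sweep against the
-- accumulated strictly-shorter paths (objective: alternative algorithm, same results).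

-- ===== PORT A =====
-- A's inner two-pointer while loop: j over other_path, k over path; returns the final j.
def pvSubLoopA (other path : List Int) (j k : Nat) : Nat :=
  if h : j < other.length ∧ k < path.length then
    pvSubLoopA other path (if other.getD j 0 == path.getD k 0 then j + 1 else j) (k + 1)
  else j
termination_by path.length - k
decreasing_by omega

def filter_unique_paths (paths_lst : List (List Int)) : List (List Int) :=
  if paths_lst = [] then []
  else
    -- for path in paths_lst: for other in paths_lst: … add path to the set and break on first hit
    let excl : PySem.Set (List Int) :=
      paths_lst.foldl (fun s path =>
        if paths_lst.any (fun other =>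
            !(path == other) && !(decide (other.length ≥ path.length)) &&
            (pvSubLoopA other path 0 0 == other.length)) then
          PySem.Set.add s path
        else s) PySem.Set.empty
    paths_lst.filter (fun path => !(PySem.Set.contains excl path))

-- ===== PORT B =====
-- `c in it` on an iterator: drop elements of the iterator until c is found, return the rest.
def pvDropUntil (c : Int) : List Int → Option (List Int)
  | [] => none
  | x :: xs => if x == c then some xs else pvDropUntil c xs

-- is_subseq(short, long): it = iter(long); all(c in it for c in short)
def pvIsSubseqB : List Int → List Int → Bool
  | [], _ => true
  | c :: rest, l =>
    match pvDropUntil c l with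
    | none => false
    | some l' => pvIsSubseqB rest l'

-- one step of B's sweep; state = (shorter, same, cur_len, excluded)
def pvStepB (st : List (List Int) × List (List Int) × Int × PySem.Set (List Int)) (p : List Int) :
    List (List Int) × List (List Int) × Int × PySem.Set (List Int) :=
  let s0 := if (p.length : Int) ≠ st.2.2.1 then (st.1 ++ st.2.1, ([] : List (List Int)), (p.length : Int))
            else (st.1, st.2.1, st.2.2.1)
  let excl := if s0.1.any (fun q => pvIsSubseqB q p) then PySem.Set.add st.2.2.2 p else st.2.2.2
  (s0.1, s0.2.1 ++ [p], s0.2.2, excl)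

def filter_unique_paths_alt (paths_lst : List (List Int)) : List (List Int) :=
  let st := (PySem.List.sorted paths_lst (fun p => (p.length : Int)) false).foldl pvStepB
              ([], [], -1, PySem.Set.empty)
  paths_lst.filter (fun p => !(PySem.Set.contains st.2.2.2 p))

-- ===== PRECONDITION & SPEC =====
def Spec_filter_unique_paths (paths_lst : List (List Int)) (out : List (List Int)) : Prop := out = filter_unique_paths_alt paths_lst
instance (paths_lst : List (List Int)) (out : List (List Int)) : Decidable (Spec_filter_unique_paths paths_lst out) := by unfold Spec_filter_unique_paths; infer_instance

-- ===== CLAIM (what is proved, stated in full; the proofs are below) =====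
def Claim_equal_filter_unique_paths : Prop := ∀ (paths_lst : List (List Int)), Dom_filter_unique_paths paths_lst → Spec_filter_unique_paths paths_lst (filter_unique_paths paths_lst)

-- ===== LEMMAS AND PROOFS =====

-- The common characterisation: p is excluded iff some strictly shorter member is a subsequence.
def pvBad (paths : List (List Int)) (p : List Int) : Bool :=
  paths.any (fun q => decide (q.length < p.length) && q.isSublist p)

-- A's two-pointer loop decides List.isSublist.
theorem pvSubLoopA_eq (other path : List Int) : ∀ (k j : Nat), j ≤ other.length →
    ((pvSubLoopA other path j k == other.length) = (other.drop j).isSublist (path.drop k)) := by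
  intro k
  induction hn : path.length - k using Nat.strong_induction_on generalizing k with
  | _ n ihn =>
  intro j hj
  rw [pvSubLoopA]
  by_cases h : j < other.length ∧ k < path.length
  · rw [dif_pos h]
    obtain ⟨hjl, hkl⟩ := h
    have hdropo := List.drop_eq_getElem_cons hjl
    have hdropp := List.drop_eq_getElem_cons hkl
    rw [List.getD_eq_getElem other 0 hjl, List.getD_eq_getElem path 0 hkl]
    by_cases heq : other[j] = path[k]
    · have hbeq : (other[j] == path[k]) = true := by simp [heq]
      rw [if_pos hbeq, ihn (path.length - (k+1)) (by omega) (k+1) rfl (j+1) (by omega)]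
      rw [hdropo, hdropp]
      simp [List.isSublist, heq]
    · have hbeq : (other[j] == path[k]) = false := by simp [heq]
      rw [if_neg (by simp [hbeq]), ihn (path.length - (k+1)) (by omega) (k+1) rfl j hj]
      rw [hdropo, hdropp, List.isSublist]
      simp [heq, ← hdropo]
  · rw [dif_neg h]
    rcases Nat.lt_or_ge j other.length with hjl | hjl
    · have hkl : path.length ≤ k := by omega
      rw [List.drop_eq_getElem_cons hjl, List.drop_of_length_le hkl]
      simp [List.isSublist]
      omega
    · have hje : j = other.length := by omega
      subst hje
      simp [List.isSublist]

-- B's iterator-consuming test decides List.isSublist.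
theorem pvIsSubseqB_eq (l q : List Int) : pvIsSubseqB q l = q.isSublist l := by
  induction l generalizing q with
  | nil => cases q <;> simp [pvIsSubseqB, pvDropUntil, List.isSublist]
  | cons x xs ih =>
    cases q with
    | nil => simp [pvIsSubseqB, List.isSublist]
    | cons c rest =>
      by_cases h : x = c
      · subst h
        simp [pvIsSubseqB, pvDropUntil, List.isSublist, ih]
      · have hbc : (x == c) = false := by simp [h]
        have hcb : (c == x) = false := by simp [Ne.symm h]
        simp [pvIsSubseqB, pvDropUntil, List.isSublist, hbc, hcb]
        rw [← ih (c :: rest)]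
        simp [pvIsSubseqB]

theorem contains_foldl_if (c : List Int → Bool) :
    ∀ (l : List (List Int)) (s : PySem.Set (List Int)) (x : List Int),
    PySem.Set.contains (l.foldl (fun s p => if c p then PySem.Set.add s p else s) s) x = true ↔
      PySem.Set.contains s x = true ∨ (x ∈ l ∧ c x = true) := by
  intro l
  induction l with
  | nil => simp
  | cons p rest ih =>
    intro s x
    simp only [List.foldl_cons, ih]
    have hs : PySem.Set.contains (if c p then PySem.Set.add s p else s) x = true ↔
        PySem.Set.contains s x = true ∨ (x = p ∧ c x = true) := by
      by_cases hc : c p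
      · rw [if_pos hc, PySem.Set.contains_iff, PySem.Set.mem_add, ← PySem.Set.contains_iff]
        constructor
        · rintro (h | rfl)
          · exact Or.inl h
          · exact Or.inr ⟨rfl, hc⟩
        · rintro (h | ⟨rfl, _⟩)
          · exact Or.inl h
          · exact Or.inr rfl
      · rw [if_neg hc]
        constructor
        · exact Or.inl
        · rintro (h | ⟨rfl, hcx⟩)
          · exact h
          · exact absurd hcx hc
    rw [hs]
    constructor
    · rintro ((h | h) | h)
      · exact Or.inl h
      · obtain ⟨rfl, hcx⟩ := h
        exact Or.inr ⟨List.mem_cons_self .., hcx⟩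
      · exact Or.inr ⟨List.mem_cons_of_mem _ h.1, h.2⟩
    · rintro (h | ⟨hm, hcx⟩)
      · exact Or.inl (Or.inl h)
      · rcases List.mem_cons.mp hm with rfl | hm
        · exact Or.inl (Or.inr ⟨rfl, hcx⟩)
        · exact Or.inr ⟨hm, hcx⟩

-- A's inner any-condition per path equals pvBad.
theorem condA_eq (paths : List (List Int)) (p : List Int) :
    (paths.any (fun other =>
      !(p == other) && !(decide (other.length ≥ p.length)) &&
      (pvSubLoopA other p 0 0 == other.length))) = pvBad paths p := by
  unfold pvBad
  refine congrArg (List.any paths) (funext fun q => ?_)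
  have hsub : (pvSubLoopA q p 0 0 == q.length) = q.isSublist p := by
    have := pvSubLoopA_eq q p 0 0 (Nat.zero_le _)
    simpa using this
  rw [hsub]
  by_cases hlt : q.length < p.length
  · have hne : (p == q) = false := by
      refine beq_eq_false_iff_ne.mpr ?_
      intro h
      subst h
      omega
    simp [hne, hlt, Nat.not_le.mpr hlt]
  · simp [hlt, Nat.le_of_not_lt hlt]

-- A computes paths.filter (¬ pvBad)
theorem portA_char (paths : List (List Int)) :
    filter_unique_paths paths = paths.filter (fun p => !(pvBad paths p)) := by
  unfold filter_unique_paths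
  by_cases hnil : paths = []
  · simp [hnil]
  · rw [if_neg hnil]
    apply List.filter_congr
    intro p hp
    have hc : PySem.Set.contains
        (paths.foldl (fun s path =>
          if paths.any (fun other =>
              !(path == other) && !(decide (other.length ≥ path.length)) &&
              (pvSubLoopA other path 0 0 == other.length)) then PySem.Set.add s path
          else s) PySem.Set.empty) p = pvBad paths p := by
      rw [Bool.eq_iff_iff]
      rw [contains_foldl_if (fun path => paths.any (fun other =>
              !(path == other) && !(decide (other.length ≥ path.length)) &&
              (pvSubLoopA other path 0 0 == other.length)))]
      simp only [condA_eq]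
      constructor
      · rintro (h | h)
        · simp [PySem.Set.empty] at h
        · exact h.2
      · intro h
        exact Or.inr ⟨hp, h⟩
    rw [hc]

-- pvBad only depends on the member set of its first argument.
theorem pvBad_congr (S T : List (List Int)) (hm : ∀ y, y ∈ S ↔ y ∈ T) (x : List Int) :
    pvBad S x = pvBad T x := by
  rw [Bool.eq_iff_iff]
  simp only [pvBad, List.any_eq_true]
  constructor
  · rintro ⟨q, hq, h⟩; exact ⟨q, (hm q).mp hq, h⟩
  · rintro ⟨q, hq, h⟩; exact ⟨q, (hm q).mpr hq, h⟩

-- Invariant of B's sweep over the length-sorted list.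
theorem invB (S : List (List Int))
    (hpw : S.Pairwise (fun a b => (a.length : Int) ≤ (b.length : Int))) :
    ∀ (rest done shorter same : List (List Int)) (curLen : Int) (excl : PySem.Set (List Int)),
    S = done ++ rest →
    (∀ x, x ∈ shorter ↔ x ∈ done ∧ (x.length : Int) < curLen) →
    (∀ x, x ∈ same ↔ x ∈ done ∧ (x.length : Int) = curLen) →
    (∀ x ∈ done, (x.length : Int) ≤ curLen) →
    (same = [] → shorter = []) →
    (∀ x, PySem.Set.contains excl x = true ↔ x ∈ done ∧ pvBad S x = true) →
    ∀ x, PySem.Set.contains (rest.foldl pvStepB (shorter, same, curLen, excl)).2.2.2 x = true ↔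
      x ∈ S ∧ pvBad S x = true := by
  intro rest
  induction rest with
  | nil =>
    intro done shorter same curLen excl hS _ _ _ _ hexcl x
    simp only [List.foldl_nil]
    rw [hexcl x, hS]
    simp
  | cons p rest ih =>
    intro done shorter same curLen excl hS hsh hsa hdle hse hexcl x
    -- order facts from the sortedness of S
    have hsplit := (List.pairwise_append.mp (hS ▸ hpw))
    have F0 : ∀ d ∈ done, (d.length : Int) ≤ (p.length : Int) :=
      fun d hd => hsplit.2.2 d hd p (List.mem_cons_self ..)
    have F1 : ∀ r ∈ rest, (p.length : Int) ≤ (r.length : Int) :=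
      (List.pairwise_cons.mp hsplit.2.1).1
    have hcur : same ≠ [] → curLen ≤ (p.length : Int) := by
      intro hne
      obtain ⟨y, hy⟩ := List.exists_mem_of_ne_nil same hne
      obtain ⟨hyd, hyl⟩ := (hsa y).mp hy
      exact hyl ▸ F0 y hyd
    have hdone_empty : same = [] → ∀ z, z ∉ done := by
      intro h0 z hz
      rcases lt_or_eq_of_le (hdle z hz) with hlt | heq
      · have := (hsh z).mpr ⟨hz, hlt⟩
        rw [hse h0] at this
        exact absurd this (List.not_mem_nil)
      · have := (hsa z).mpr ⟨hz, heq⟩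
        rw [h0] at this
        exact absurd this (List.not_mem_nil)
    -- name the state after one step
    simp only [List.foldl_cons, pvStepB]
    set flush := (p.length : Int) ≠ curLen with hflush
    set shorter' := if flush then shorter ++ same else shorter with hshorter'
    set same0 := if flush then ([] : List (List Int)) else same with hsame0
    have htup : (if flush then (shorter ++ same, ([] : List (List Int)), (p.length : Int))
        else (shorter, same, curLen)) = (shorter', same0, (p.length : Int)) := by
      by_cases hf : flush
      · simp [hshorter', hsame0, hf]
      · have hc : curLen = (p.length : Int) := (not_ne_iff.mp hf).symm
        simp [hshorter', hsame0, hf, hc]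
    rw [htup]
    -- characterisation of shorter'
    have Fsh : ∀ z, z ∈ shorter' ↔ z ∈ done ∧ (z.length : Int) < (p.length : Int) := by
      intro z
      rw [hshorter']
      by_cases hf : flush
      · rw [if_pos hf]
        constructor
        · intro hz
          rcases List.mem_append.mp hz with hz | hz
          · rcases eq_or_ne same [] with h0 | h0
            · rw [hse h0] at hz
              exact absurd hz (List.not_mem_nil)
            · obtain ⟨hzd, hzl⟩ := (hsh z).mp hz
              exact ⟨hzd, lt_of_lt_of_le hzl (hcur h0)⟩
          · obtain ⟨hzd, hzl⟩ := (hsa z).mp hz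
            refine ⟨hzd, lt_of_le_of_ne (F0 z hzd) ?_⟩
            intro hc
            exact hf (by omega)
        · rintro ⟨hzd, hzl⟩
          rcases lt_or_eq_of_le (hdle z hzd) with hlt | heq
          · exact List.mem_append.mpr (Or.inl ((hsh z).mpr ⟨hzd, hlt⟩))
          · exact List.mem_append.mpr (Or.inr ((hsa z).mpr ⟨hzd, heq⟩))
      · rw [if_neg hf]
        have hc : curLen = (p.length : Int) := (not_ne_iff.mp hf).symm
        rw [hsh z, hc]
    -- the test made at p equals pvBad S p
    have Fcond : shorter'.any (fun q => pvIsSubseqB q p) = pvBad S p := by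
      rw [Bool.eq_iff_iff]
      simp only [List.any_eq_true, pvBad, Bool.and_eq_true, decide_eq_true_eq]
      constructor
      · rintro ⟨q, hq, hsub⟩
        obtain ⟨hqd, hql⟩ := (Fsh q).mp hq
        rw [pvIsSubseqB_eq] at hsub
        exact ⟨q, hS ▸ List.mem_append.mpr (Or.inl hqd), by exact_mod_cast hql, hsub⟩
      · rintro ⟨q, hq, hql, hsub⟩
        have hql' : (q.length : Int) < (p.length : Int) := by exact_mod_cast hql
        have hqd : q ∈ done := by
          rw [hS] at hq
          rcases List.mem_append.mp hq with h | h
          · exact h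
          · rcases List.mem_cons.mp h with rfl | h
            · omega
            · have := F1 q h
              omega
        refine ⟨q, (Fsh q).mpr ⟨hqd, hql'⟩, ?_⟩
        rw [pvIsSubseqB_eq]
        exact hsub
    -- apply the induction hypothesis to the new state
    refine ih (done ++ [p]) shorter' (same0 ++ [p]) (p.length : Int) _
      (by rw [hS]; simp) ?_ ?_ ?_ (by simp) ?_ x
    · -- shorter'
      intro z
      rw [Fsh z]
      constructor
      · rintro ⟨hzd, hzl⟩
        exact ⟨List.mem_append.mpr (Or.inl hzd), hzl⟩
      · rintro ⟨hzd, hzl⟩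
        rcases List.mem_append.mp hzd with h | h
        · exact ⟨h, hzl⟩
        · rcases List.mem_singleton.mp h with rfl
          omega
    · -- same0 ++ [p]
      intro z
      rw [hsame0]
      by_cases hf : flush
      · rw [if_pos hf]
        simp only [List.nil_append, List.mem_singleton, List.mem_append]
        constructor
        · rintro rfl
          exact ⟨Or.inr rfl, rfl⟩
        · rintro ⟨hzd, hzl⟩
          rcases hzd with hzd | hzd
          · -- z ∈ done with len z = len p is impossible on a flush
            exfalso
            rcases eq_or_ne same [] with h0 | h0
            · exact hdone_empty h0 z hzd
            · have h1 := hcur h0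
              have h2 := hdle z hzd
              exact hf (by omega)
          · exact hzd
      · rw [if_neg hf]
        have hc : curLen = (p.length : Int) := (not_ne_iff.mp hf).symm
        simp only [List.mem_append, List.mem_singleton]
        constructor
        · rintro (hz | rfl)
          · obtain ⟨hzd, hzl⟩ := (hsa z).mp hz
            exact ⟨Or.inl hzd, hc ▸ hzl⟩
          · exact ⟨Or.inr rfl, rfl⟩
        · rintro ⟨hzd | rfl, hzl⟩
          · exact Or.inl ((hsa z).mpr ⟨hzd, hc ▸ hzl⟩)
          · exact Or.inr rfl
    · -- all of done ++ [p] are short enough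
      intro z hz
      rcases List.mem_append.mp hz with h | h
      · exact F0 z h
      · rcases List.mem_singleton.mp h with rfl
        exact le_refl _
    · -- the excluded set after the step
      intro z
      by_cases hc : shorter'.any (fun q => pvIsSubseqB q p) = true
      · rw [if_pos hc, PySem.Set.contains_iff, PySem.Set.mem_add, ← PySem.Set.contains_iff]
        constructor
        · rintro (h | rfl)
          · obtain ⟨hzd, hzb⟩ := (hexcl z).mp h
            exact ⟨List.mem_append.mpr (Or.inl hzd), hzb⟩
          · exact ⟨List.mem_append.mpr (Or.inr (List.mem_singleton.mpr rfl)), Fcond ▸ hc⟩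
        · rintro ⟨hzd, hzb⟩
          rcases List.mem_append.mp hzd with h | h
          · exact Or.inl ((hexcl z).mpr ⟨h, hzb⟩)
          · exact Or.inr (List.mem_singleton.mp h)
      · rw [if_neg hc]
        rw [hexcl z]
        constructor
        · rintro ⟨hzd, hzb⟩
          exact ⟨List.mem_append.mpr (Or.inl hzd), hzb⟩
        · rintro ⟨hzd, hzb⟩
          rcases List.mem_append.mp hzd with h | h
          · exact ⟨h, hzb⟩
          · rcases List.mem_singleton.mp h with rfl
            exact absurd (Fcond ▸ hzb) hc

-- B computes the same filter
theorem portB_char (paths : List (List Int)) :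
    filter_unique_paths_alt paths = paths.filter (fun p => !(pvBad paths p)) := by
  unfold filter_unique_paths_alt
  have hpw : (PySem.List.sorted paths (fun p : List Int => (p.length : Int)) false).Pairwise
      (fun a b => (a.length : Int) ≤ (b.length : Int)) :=
    PySem.List.sorted_pairwise paths (fun p : List Int => (p.length : Int))
  have hmem : ∀ y, y ∈ PySem.List.sorted paths (fun p : List Int => (p.length : Int)) false ↔
      y ∈ paths := fun y => PySem.List.mem_sorted paths _ false y
  have hinv := invB _ hpw
    (PySem.List.sorted paths (fun p : List Int => (p.length : Int)) false)
    [] [] [] (-1) PySem.Set.empty rfl (by simp) (by simp) (by simp) (by simp)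
    (fun z => by rw [PySem.Set.contains_iff]; simp [PySem.Set.empty])
  apply List.filter_congr
  intro p hp
  have hc : PySem.Set.contains
      (((PySem.List.sorted paths (fun p : List Int => (p.length : Int)) false).foldl pvStepB
        ([], [], -1, PySem.Set.empty)).2.2.2) p = pvBad paths p := by
    rw [Bool.eq_iff_iff, hinv p, pvBad_congr _ paths hmem p]
    constructor
    · exact fun h => h.2
    · exact fun h => ⟨(hmem p).mpr hp, h⟩
  rw [hc]

-- ===== VERDICT (by name: the statement is the Claim_ definition above) =====
theorem filter_unique_paths_spec : Claim_equal_filter_unique_paths := by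
  intro paths _
  unfold Spec_filter_unique_paths
  rw [portA_char, portB_char]
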